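-- pv_equiv track=rewrite | github.com/Galaktikkon/data-structures-algorithims | all/egaminy/2022-2023/egz2/A-dominacja/egz2a.py | dominance
-- ===== SOURCE A (Python) =====
-- def countingSort(A, k, idx):
--     n = len(A)
--
--     C = [0]*k
--     B = [0]*n
--
--     for i in range(n):
--         C[A[i][idx]] += 1
--
--     for i in range(1, k):
--         C[i] = C[i]+C[i-1]
--
--     for i in range(n-1, -1, -1):
--         B[C[A[i][idx]]-1] = A[i]
--         C[A[i][idx]] -= 1
--
--     return B
--
-- def dominance(P):
--     # tu prosze wpisac wlasna implementacje
--     n = len(P)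
--     S = countingSort(P, n+1, 0)
--     X = [0 for _ in range(n+1)]
--     Y = [0 for _ in range(n+1)]
--
--     for i in range(n):
--         Y[P[i][1]] += 1
--         X[P[i][0]] += 1
--
--     for i in range(n-1, -1, -1):
--         Y[i] = Y[i+1]+Y[i]
--
--     sol = -1
--     for i in range(n-1, -1, -1):
--         sol = max(sol, i-Y[S[i][1]]+1-X[S[i][0]]+1)  # type: ignore
--         X[S[i][0]] -= 1  # type: ignore
--     return sol
-- ===== SOURCE B (Python) =====
-- def dominance(P):
--     n = len(P)
--     Xcnt = [0]*(n+1)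
--     Ysuf = [0]*(n+1)
--     for x, y in P:
--         Xcnt[x] += 1
--         Ysuf[y] += 1
--     for v in range(n-1, -1, -1):
--         Ysuf[v] += Ysuf[v+1]
--     Xlt = [0]*(n+1)
--     less = 0
--     for v in range(n+1):
--         Xlt[v] = less
--         less += Xcnt[v]
--     best = -1
--     for x, y in P:
--         val = Xlt[x] + 1 - Ysuf[y]
--         if val > best:
--             best = val
--     return best
-- ===== Notes on version B (the rewrite author's own statement) =====
-- stated objective: simpler
-- what changed: Drops the counting sort and the rank/decrement trick: B builds coordinate count arrays, turns them into a prefix sum (#points with smaller x) and a suffix sum (#points with y >= v), and takes the best value in one direct pass over the points.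
import Mathlib
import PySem

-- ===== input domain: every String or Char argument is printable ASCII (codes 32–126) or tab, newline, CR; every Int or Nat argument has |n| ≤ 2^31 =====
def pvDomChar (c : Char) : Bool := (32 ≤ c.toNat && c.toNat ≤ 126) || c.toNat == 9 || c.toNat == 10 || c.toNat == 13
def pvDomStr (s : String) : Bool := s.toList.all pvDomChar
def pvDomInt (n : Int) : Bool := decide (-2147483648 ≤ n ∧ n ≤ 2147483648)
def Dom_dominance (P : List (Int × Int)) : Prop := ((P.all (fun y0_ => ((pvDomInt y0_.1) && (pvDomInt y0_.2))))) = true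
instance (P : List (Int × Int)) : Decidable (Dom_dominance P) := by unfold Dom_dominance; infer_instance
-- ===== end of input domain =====

-- B replaces A's counting sort + rank/decrement trick by prefix/suffix count sums and one direct max pass (objective: simpler).

-- ===== PORT A =====
def countingSort (A : List (Int × Int)) (k : Int) (idx : Int) : List (Int × Int) :=
  let n : Int := A.length
  let C : List Int := List.replicate k.toNat 0
  let B : List (Int × Int) := List.replicate n.toNat (0, 0)  -- Python's [0]*n; every slot is overwritten before being read under Pre_
  let key : Int × Int → Int := fun p => if idx = 0 then p.1 else p.2  -- A[i][idx] on a pair, idx ∈ {0,1}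
  let C := (PySem.List.pyRange 0 n 1).foldl (fun C i =>
    let e := key (PySem.List.pyGetD A i (0, 0))
    PySem.List.pySetD C e (PySem.List.pyGetD C e 0 + 1)) C
  let C := (PySem.List.pyRange 1 k 1).foldl (fun C i =>
    PySem.List.pySetD C i (PySem.List.pyGetD C i 0 + PySem.List.pyGetD C (i - 1) 0)) C
  let BC := (PySem.List.pyRange (n - 1) (-1) (-1)).foldl (fun (BC : List (Int × Int) × List Int) i =>
    let e := key (PySem.List.pyGetD A i (0, 0))
    let B' := PySem.List.pySetD BC.1 (PySem.List.pyGetD BC.2 e 0 - 1) (PySem.List.pyGetD A i (0, 0))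
    let C' := PySem.List.pySetD BC.2 e (PySem.List.pyGetD BC.2 e 0 - 1)
    (B', C')) (B, C)
  BC.1

def dominance (P : List (Int × Int)) : Int :=
  let n : Int := P.length
  let S := countingSort P (n + 1) 0
  let XY := (PySem.List.pyRange 0 n 1).foldl (fun (XY : List Int × List Int) i =>
    let p := PySem.List.pyGetD P i (0, 0)
    let Y' := PySem.List.pySetD XY.2 p.2 (PySem.List.pyGetD XY.2 p.2 0 + 1)
    let X' := PySem.List.pySetD XY.1 p.1 (PySem.List.pyGetD XY.1 p.1 0 + 1)
    (X', Y')) (List.replicate (n + 1).toNat 0, List.replicate (n + 1).toNat 0)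
  let Y := (PySem.List.pyRange (n - 1) (-1) (-1)).foldl (fun Y i =>
    PySem.List.pySetD Y i (PySem.List.pyGetD Y (i + 1) 0 + PySem.List.pyGetD Y i 0)) XY.2
  let SX := (PySem.List.pyRange (n - 1) (-1) (-1)).foldl (fun (SX : Int × List Int) i =>
    let p := PySem.List.pyGetD S i (0, 0)
    let sol := max SX.1 (i - PySem.List.pyGetD Y p.2 0 + 1 - PySem.List.pyGetD SX.2 p.1 0 + 1)
    let X' := PySem.List.pySetD SX.2 p.1 (PySem.List.pyGetD SX.2 p.1 0 - 1)
    (sol, X')) ((-1 : Int), XY.1)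
  SX.1

-- ===== PORT B =====
def dominance_alt (P : List (Int × Int)) : Int :=
  let n : Int := P.length
  let XY := P.foldl (fun (XY : List Int × List Int) p =>
    (PySem.List.pySetD XY.1 p.1 (PySem.List.pyGetD XY.1 p.1 0 + 1),
     PySem.List.pySetD XY.2 p.2 (PySem.List.pyGetD XY.2 p.2 0 + 1)))
    (List.replicate (n + 1).toNat 0, List.replicate (n + 1).toNat 0)
  let Ysuf := (PySem.List.pyRange (n - 1) (-1) (-1)).foldl (fun Y v =>
    PySem.List.pySetD Y v (PySem.List.pyGetD Y v 0 + PySem.List.pyGetD Y (v + 1) 0)) XY.2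
  let XL := (PySem.List.pyRange 0 (n + 1) 1).foldl (fun (XL : List Int × Int) v =>
    (PySem.List.pySetD XL.1 v XL.2, XL.2 + PySem.List.pyGetD XY.1 v 0)) (List.replicate (n + 1).toNat 0, 0)
  P.foldl (fun best p =>
    let val := PySem.List.pyGetD XL.1 p.1 0 + 1 - PySem.List.pyGetD Ysuf p.2 0
    if val > best then val else best) (-1)

-- ===== PRECONDITION & SPEC =====
-- Pre_: every coordinate lies in [-(n+1), n] (n = len(P)); outside this range A raises IndexError
-- on its size-(n+1) arrays (and B raises IndexError on the same arrays), so Pre_ excludes exactly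
-- the inputs on which the Python A does not return.
def Pre_dominance (P : List (Int × Int)) : Prop :=
  ∀ p ∈ P, -((P.length : Int) + 1) ≤ p.1 ∧ p.1 ≤ (P.length : Int) ∧
           -((P.length : Int) + 1) ≤ p.2 ∧ p.2 ≤ (P.length : Int)
instance (P : List (Int × Int)) : Decidable (Pre_dominance P) := by unfold Pre_dominance; infer_instance

def pvWitness_dominance : (List (Int × Int)) := [(0, 2), (1, 0), (-1, 1)]

def Spec_dominance (P : List (Int × Int)) (out : Int) : Prop := out = dominance_alt P
instance (P : List (Int × Int)) (out : Int) : Decidable (Spec_dominance P out) := by unfold Spec_dominance; infer_instance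

-- ===== CLAIM (what is proved, stated in full; the proofs are below) =====
def Claim_equal_dominance : Prop := ∀ (P : List (Int × Int)), Dom_dominance P → Pre_dominance P → Spec_dominance P (dominance P)

-- ===== LEMMAS AND PROOFS =====

-- Python index normalisation: for -L ≤ v < L, list access at v is access at pvNrm L v ∈ [0, L).
def pvNrm (L : Nat) (v : Int) : Nat := if v < 0 then (v + L).toNat else v.toNat

lemma pvNrm_lt (L : Nat) (v : Int) (h1 : -(L : Int) ≤ v) (h2 : v < L) : pvNrm L v < L := by
  unfold pvNrm; split <;> omega

lemma pyIdx?_nrm (L : Nat) (v : Int) (h1 : -(L : Int) ≤ v) (h2 : v < L) :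
    PySem.List.pyIdx? L v = some (pvNrm L v) := by
  unfold PySem.List.pyIdx? pvNrm; split_ifs <;> simp <;> omega

lemma pyGetD_nrm {α : Type} (xs : List α) (v : Int) (d : α)
    (h1 : -(xs.length : Int) ≤ v) (h2 : v < xs.length) :
    PySem.List.pyGetD xs v d = xs.getD (pvNrm xs.length v) d := by
  unfold PySem.List.pyGetD PySem.List.pyGet?
  rw [pyIdx?_nrm _ _ h1 h2]
  simp [List.getD, Option.bind]

lemma pySetD_nrm {α : Type} (xs : List α) (v : Int) (x : α)
    (h1 : -(xs.length : Int) ≤ v) (h2 : v < xs.length) :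
    PySem.List.pySetD xs v x = xs.set (pvNrm xs.length v) x := by
  unfold PySem.List.pySetD PySem.List.pySet?
  rw [pyIdx?_nrm _ _ h1 h2]
  rfl

-- normalised coordinates and the counting functions (L is the array size n+1)
def pvKx (L : Nat) (p : Int × Int) : Nat := pvNrm L p.1
def pvKy (L : Nat) (p : Int × Int) : Nat := pvNrm L p.2

def pvCntx (L : Nat) (Q : List (Int × Int)) (e : Nat) : Nat := Q.countP (fun p => decide (pvKx L p = e))
def pvLtx  (L : Nat) (Q : List (Int × Int)) (e : Nat) : Nat := Q.countP (fun p => decide (pvKx L p < e))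
def pvPrefx (L : Nat) (Q : List (Int × Int)) (e : Nat) : Nat := Q.countP (fun p => decide (pvKx L p ≤ e))
def pvCnty (L : Nat) (Q : List (Int × Int)) (e : Nat) : Nat := Q.countP (fun p => decide (pvKy L p = e))
def pvGey  (L : Nat) (Q : List (Int × Int)) (e : Nat) : Nat := Q.countP (fun p => decide (e ≤ pvKy L p))

-- the slot where counting sort puts element j, and the value A's last loop computes for it
def pvRank (L : Nat) (Q : List (Int × Int)) (j : Nat) : Nat :=
  (Q.take (j + 1)).countP (fun p => decide (pvKx L p = pvKx L (Q.getD j (0, 0))))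
def pvSlot (L : Nat) (Q : List (Int × Int)) (j : Nat) : Nat :=
  pvLtx L Q (pvKx L (Q.getD j (0, 0))) + pvRank L Q j - 1
def pvVal (L : Nat) (Q : List (Int × Int)) (p : Int × Int) : Int :=
  (pvLtx L Q (pvKx L p) : Int) + 1 - (pvGey L Q (pvKy L p) : Int)

def pvSufx (L : Nat) (Q : List (Int × Int)) (i e : Nat) : Nat :=
  (Q.drop i).countP (fun p => decide (pvKx L p = e))
def pvG (L : Nat) (Q S : List (Int × Int)) (j : Nat) : Int :=
  (j : Int) - (pvGey L Q (pvKy L (S.getD j (0, 0))) : Int) + 1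
    - ((pvCntx L Q (pvKx L (S.getD j (0, 0))) : Int) - (pvSufx L S (j + 1) (pvKx L (S.getD j (0, 0))) : Int)) + 1

-- getD/set facts specialised to our arrays
lemma pvGetD_set_self {α : Type} (l : List α) (i : Nat) (h : i < l.length) (v : α) (d : α) :
    (l.set i v).getD i d = v := by
  rw [List.getD_eq_getElem _ _ (by simpa using h)]; simp

lemma pvGetD_set_ne {α : Type} (l : List α) (i j : Nat) (v : α) (d : α) (h : i ≠ j) :
    (l.set i v).getD j d = l.getD j d := by
  rcases lt_or_ge j l.length with hj | hj
  · rw [List.getD_eq_getElem _ _ (by simpa using hj), List.getD_eq_getElem _ _ hj]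
    simp only [List.getElem_set]
    split
    · omega
    · rfl
  · rw [List.getD_eq_default _ _ (by simpa using hj), List.getD_eq_default _ _ hj]

lemma pvCountP_take_drop {α : Type} (l : List α) (j : Nat) (p : α → Bool) :
    l.countP p = (l.take j).countP p + (l.drop j).countP p := by
  conv_lhs => rw [← List.take_append_drop j l]
  rw [List.countP_append]

-- count identities
lemma pvLtx_zero (L : Nat) (Q : List (Int × Int)) : pvLtx L Q 0 = 0 := by
  simp [pvLtx]

lemma pvCountP_split {α : Type} (l : List α) (p q r : α → Bool)
    (h : ∀ x, (p x = true ↔ (q x = true ∨ r x = true)) ∧ ¬(q x = true ∧ r x = true)) :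
    l.countP p = l.countP q + l.countP r := by
  induction l with
  | nil => simp
  | cons a l ih =>
    simp only [List.countP_cons]
    rcases h a with ⟨h1, h2⟩
    by_cases hq : q a = true <;> by_cases hr : r a = true <;>
      simp [hq, hr] at h1 h2 ⊢ <;> simp [h1] <;> omega

lemma pvLtx_succ (L : Nat) (Q : List (Int × Int)) (e : Nat) :
    pvLtx L Q (e + 1) = pvLtx L Q e + pvCntx L Q e := by
  refine pvCountP_split Q _ _ _ ?_
  intro x
  simp only [decide_eq_true_eq]
  omega

lemma pvPrefx_eq (L : Nat) (Q : List (Int × Int)) (e : Nat) :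
    pvPrefx L Q e = pvLtx L Q (e + 1) := by
  unfold pvPrefx pvLtx
  refine List.countP_congr ?_
  intro x _
  simp only [decide_eq_true_eq]
  omega

lemma pvGey_succ (L : Nat) (Q : List (Int × Int)) (e : Nat) :
    pvGey L Q e = pvCnty L Q e + pvGey L Q (e + 1) := by
  refine pvCountP_split Q _ _ _ ?_
  intro x
  simp only [decide_eq_true_eq]
  omega

lemma pvGey_top (L n : Nat) (Q : List (Int × Int)) (h : ∀ p ∈ Q, pvKy L p ≤ n) :
    pvGey L Q n = pvCnty L Q n := by
  unfold pvGey pvCnty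
  refine List.countP_congr ?_
  intro x hx
  have := h x hx
  simp only [decide_eq_true_eq]
  omega

lemma pvLtx_mono (L : Nat) (Q : List (Int × Int)) {e e' : Nat} (h : e ≤ e') :
    pvLtx L Q e ≤ pvLtx L Q e' := by
  unfold pvLtx
  refine List.countP_mono_left ?_
  intro x _
  simp only [decide_eq_true_eq]
  omega

lemma pvCntx_le_sum (L : Nat) (Q : List (Int × Int)) (e : Nat) :
    pvLtx L Q e + pvCntx L Q e ≤ Q.length := by
  rw [← pvLtx_succ]
  exact List.countP_le_length

-- pairwise fold split and list-as-map-of-getD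
lemma pvFoldl_pair_split {α β γ : Type} (Q : List γ) (f : α → γ → α) (g : β → γ → β) (a : α) (b : β) :
    Q.foldl (fun ab p => (f ab.1 p, g ab.2 p)) (a, b) = (Q.foldl f a, Q.foldl g b) := by
  induction Q generalizing a b with
  | nil => rfl
  | cons p Q ih => simpa using ih (f a p) (g b p)

lemma pvList_eq_map_getD_range {α : Type} (xs : List α) (d : α) :
    xs = (List.range xs.length).map (fun j => xs.getD j d) := by
  refine List.ext_getElem (by simp) ?_
  intro i h1 h2
  simp only [List.getElem_map, List.getElem_range]
  rw [List.getD_eq_getElem _ _ h1]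
-- slot facts
lemma pvRank_le (L : Nat) (Q : List (Int × Int)) (j : Nat) :
    pvRank L Q j ≤ pvCntx L Q (pvKx L (Q.getD j (0, 0))) := by
  exact (List.take_sublist (j + 1) Q).countP_le

lemma pvRank_pos (L : Nat) (Q : List (Int × Int)) (j : Nat) (h : j < Q.length) :
    1 ≤ pvRank L Q j := by
  unfold pvRank
  rw [Nat.one_le_iff_ne_zero, ← Nat.pos_iff_ne_zero, List.countP_pos_iff]
  refine ⟨Q.getD j (0, 0), ?_, by simp⟩
  rw [List.getD_eq_getElem _ _ h]
  have hj : j < (Q.take (j + 1)).length := by simp; omega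
  have : (Q.take (j + 1))[j] = Q[j] := List.getElem_take
  exact this ▸ List.getElem_mem hj

lemma pvRank_strict (L : Nat) (Q : List (Int × Int)) {j j' : Nat} (h : j < j') (h' : j' < Q.length)
    (hk : pvKx L (Q.getD j' (0, 0)) = pvKx L (Q.getD j (0, 0))) :
    pvRank L Q j < pvRank L Q j' := by
  unfold pvRank
  rw [hk]
  have h1 : (Q.take (j + 1)).countP (fun p => decide (pvKx L p = pvKx L (Q.getD j (0, 0)))) ≤
      (Q.take j').countP (fun p => decide (pvKx L p = pvKx L (Q.getD j (0, 0)))) := by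
    have he : Q.take (j + 1) = (Q.take j').take (j + 1) := by
      rw [List.take_take]
      congr 1
      omega
    rw [he]
    exact (List.take_sublist _ _).countP_le
  have h2 : Q.take (j' + 1) = Q.take j' ++ [Q[j']] := by
    rw [List.take_add_one]
    simp [List.getElem?_eq_getElem h']
  rw [h2, List.countP_append]
  have h3 : (List.countP (fun p => decide (pvKx L p = pvKx L (Q.getD j (0, 0)))) [Q[j']]) = 1 := by
    have : pvKx L Q[j'] = pvKx L (Q.getD j (0, 0)) := by
      rw [← hk, List.getD_eq_getElem _ _ h']
    simp [this]
  omega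

lemma pvSlot_lt (L : Nat) (Q : List (Int × Int)) {j : Nat} (h : j < Q.length) :
    pvSlot L Q j < Q.length := by
  have h1 := pvRank_le L Q j
  have h2 := pvRank_pos L Q j h
  have h3 := pvCntx_le_sum L Q (pvKx L (Q.getD j (0, 0)))
  unfold pvSlot
  omega

lemma pvSlot_kxlt (L : Nat) (Q : List (Int × Int)) {j j' : Nat} (hj : j < Q.length) (hj' : j' < Q.length)
    (hk : pvKx L (Q.getD j (0, 0)) < pvKx L (Q.getD j' (0, 0))) :
    pvSlot L Q j < pvSlot L Q j' := by
  have h1 := pvRank_le L Q j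
  have h0 := pvRank_pos L Q j hj
  have h2 := pvRank_pos L Q j' hj'
  have h3 : pvLtx L Q (pvKx L (Q.getD j (0, 0))) + pvCntx L Q (pvKx L (Q.getD j (0, 0))) ≤
      pvLtx L Q (pvKx L (Q.getD j' (0, 0))) := by
    rw [← pvLtx_succ]
    exact pvLtx_mono L Q hk
  unfold pvSlot
  omega

lemma pvSlot_ne (L : Nat) (Q : List (Int × Int)) {j j' : Nat} (h : j < j') (h' : j' < Q.length) :
    pvSlot L Q j ≠ pvSlot L Q j' := by
  rcases Nat.lt_trichotomy (pvKx L (Q.getD j (0, 0))) (pvKx L (Q.getD j' (0, 0))) with hk | hk | hk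
  · exact Nat.ne_of_lt (pvSlot_kxlt L Q (by omega) h' hk)
  · have hr := pvRank_strict L Q h h' hk.symm
    have h1 := pvRank_pos L Q j (by omega)
    unfold pvSlot
    rw [hk]
    omega
  · exact (Nat.ne_of_lt (pvSlot_kxlt L Q h' (by omega) hk)).symm

lemma pvSlots_perm (L : Nat) (Q : List (Int × Int)) :
    ((List.range Q.length).map (fun j => pvSlot L Q j)).Perm (List.range Q.length) := by
  apply List.Subperm.perm_of_length_le
  · refine List.subperm_of_subset ?_ ?_
    · have hp : List.Pairwise (fun a b => pvSlot L Q a ≠ pvSlot L Q b) (List.range Q.length) := by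
        rw [List.pairwise_iff_getElem]
        intro i j hi hj hij
        simp only [List.getElem_range]
        exact pvSlot_ne L Q hij (by simpa using hj)
      exact (List.pairwise_map).2 hp
    · intro s hs
      rcases List.mem_map.1 hs with ⟨j, hj, rfl⟩
      rw [List.mem_range] at hj ⊢
      exact pvSlot_lt L Q hj
  · simp

lemma pvSurj (L : Nat) (Q : List (Int × Int)) {s : Nat} (hs : s < Q.length) :
    ∃ j, j < Q.length ∧ pvSlot L Q j = s := by
  have : s ∈ (List.range Q.length).map (fun j => pvSlot L Q j) :=
    ((pvSlots_perm L Q).mem_iff).2 (List.mem_range.2 hs)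
  rcases List.mem_map.1 this with ⟨j, hj, e⟩
  exact ⟨j, List.mem_range.1 hj, e⟩

lemma pvS_perm (L : Nat) (Q S : List (Int × Int)) (hlen : S.length = Q.length)
    (hget : ∀ j, j < Q.length → S.getD (pvSlot L Q j) (0, 0) = Q.getD j (0, 0)) :
    S.Perm Q := by
  have hQ : Q = ((List.range Q.length).map (fun j => pvSlot L Q j)).map
      (fun s => S.getD s (0, 0)) := by
    rw [List.map_map]
    conv_lhs => rw [pvList_eq_map_getD_range Q (0, 0)]
    refine List.map_congr_left ?_
    intro j hj
    rw [List.mem_range] at hj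
    exact (hget j hj).symm
  have hS : S = (List.range Q.length).map (fun s => S.getD s (0, 0)) := by
    conv_lhs => rw [pvList_eq_map_getD_range S (0, 0), hlen]
  rw [hQ]
  conv_lhs => rw [hS]
  exact ((pvSlots_perm L Q).map _).symm

lemma pvS_sorted (L : Nat) (Q S : List (Int × Int)) (_hlen : S.length = Q.length)
    (hget : ∀ j, j < Q.length → S.getD (pvSlot L Q j) (0, 0) = Q.getD j (0, 0))
    {a b : Nat} (hab : a < b) (hb : b < Q.length) :
    pvKx L (S.getD a (0, 0)) ≤ pvKx L (S.getD b (0, 0)) := by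
  obtain ⟨ja, hja, ea⟩ := pvSurj L Q (s := a) (by omega)
  obtain ⟨jb, hjb, eb⟩ := pvSurj L Q (s := b) hb
  have hSa : S.getD a (0, 0) = Q.getD ja (0, 0) := by rw [← ea, hget ja hja]
  have hSb : S.getD b (0, 0) = Q.getD jb (0, 0) := by rw [← eb, hget jb hjb]
  by_contra hcon
  have hcon2 : pvKx L (S.getD b (0, 0)) < pvKx L (S.getD a (0, 0)) := Nat.lt_of_not_le hcon
  rw [hSa, hSb] at hcon2
  have := pvSlot_kxlt L Q hjb hja hcon2
  omega
lemma pvG_eq_val (L : Nat) (Q S : List (Int × Int)) (hlen : S.length = Q.length)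
    (hget : ∀ j, j < Q.length → S.getD (pvSlot L Q j) (0, 0) = Q.getD j (0, 0))
    {j : Nat} (hj : j < Q.length) :
    pvG L Q S j = pvVal L Q (S.getD j (0, 0)) := by
  have hperm : S.Perm Q := pvS_perm L Q S hlen hget
  set k := pvKx L (S.getD j (0, 0)) with hk
  -- counts over Q equal counts over S
  have hcnt : pvCntx L Q k = pvCntx L S k := (hperm.countP_eq _).symm
  have hltx : pvLtx L Q k = pvLtx L S k := (hperm.countP_eq _).symm
  -- split count of k over S at position j+1
  have hsplit : pvCntx L S k =
      (S.take (j + 1)).countP (fun p => decide (pvKx L p = k)) + pvSufx L S (j + 1) k :=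
    pvCountP_take_drop S (j + 1) _
  -- every element in the first j+1 positions has key ≤ k
  have htake_le : ∀ x ∈ S.take (j + 1), pvKx L x ≤ k := by
    intro x hx
    rcases List.mem_iff_getElem.1 hx with ⟨a, ha, rfl⟩
    have ha2 : a < j + 1 := by simp at ha; omega
    have ha3 : a < S.length := by simp at ha; omega
    have he : (S.take (j + 1))[a] = S[a] := List.getElem_take
    rw [he]
    rcases Nat.lt_or_ge a j with hlt | hge
    · have := pvS_sorted L Q S hlen hget hlt hj
      rw [List.getD_eq_getElem _ _ ha3] at this
      exact this
    · have haj : a = j := by omega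
      subst haj
      rw [hk, List.getD_eq_getElem _ _ ha3]
  -- the first j+1 positions split into keys < k and keys = k
  have hlen_take : (S.take (j + 1)).length = j + 1 := by
    simp [hlen]; omega
  have hall : (S.take (j + 1)).countP (fun p => decide (pvKx L p ≤ k)) = j + 1 := by
    rw [List.countP_eq_length.2 ?_, hlen_take]
    intro x hx
    simpa using htake_le x hx
  have hsplit2 : (S.take (j + 1)).countP (fun p => decide (pvKx L p ≤ k)) =
      (S.take (j + 1)).countP (fun p => decide (pvKx L p < k)) +
      (S.take (j + 1)).countP (fun p => decide (pvKx L p = k)) := by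
    refine pvCountP_split _ _ _ _ ?_
    intro x
    simp only [decide_eq_true_eq]
    omega
  -- keys < k only occur in the first j+1 positions
  have hdrop0 : (S.drop (j + 1)).countP (fun p => decide (pvKx L p < k)) = 0 := by
    rw [List.countP_eq_zero]
    intro x hx
    rcases List.mem_iff_getElem.1 hx with ⟨a, ha, rfl⟩
    have ha3 : j + 1 + a < S.length := by simp at ha; omega
    have he : (S.drop (j + 1))[a] = S[j + 1 + a] := List.getElem_drop ..
    rw [he]
    have hs := pvS_sorted L Q S hlen hget (a := j) (b := j + 1 + a) (by omega) (by omega)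
    rw [List.getD_eq_getElem _ _ ha3] at hs
    rw [← hk] at hs
    simp only [decide_eq_true_eq]
    omega
  have hltx_take : pvLtx L S k = (S.take (j + 1)).countP (fun p => decide (pvKx L p < k)) := by
    unfold pvLtx
    rw [pvCountP_take_drop S (j + 1) _, hdrop0]
    omega
  -- put it together in ℤ
  unfold pvG pvVal
  rw [← hk]
  omega
lemma pvCfold_char (L : Nat) (sel : Int × Int → Int) :
    ∀ (Q : List (Int × Int)) (C : List Int), C.length = L →
      (∀ p ∈ Q, -(L : Int) ≤ sel p ∧ sel p < L) →
      (Q.foldl (fun C p => PySem.List.pySetD C (sel p) (PySem.List.pyGetD C (sel p) 0 + 1)) C).length = L ∧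
      ∀ e : Nat, (Q.foldl (fun C p => PySem.List.pySetD C (sel p) (PySem.List.pyGetD C (sel p) 0 + 1)) C).getD e 0
        = C.getD e 0 + (Q.countP (fun p => decide (pvNrm L (sel p) = e)) : Int) := by
  intro Q
  induction Q with
  | nil => intro C hC _; simpa using hC
  | cons p Q ih =>
    intro C hC hb
    have hp := hb p (by simp)
    have h1 : -(C.length : Int) ≤ sel p := by rw [hC]; exact hp.1
    have h2 : sel p < (C.length : Int) := by rw [hC]; exact hp.2
    have hset : PySem.List.pySetD C (sel p) (PySem.List.pyGetD C (sel p) 0 + 1)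
        = C.set (pvNrm L (sel p)) (C.getD (pvNrm L (sel p)) 0 + 1) := by
      rw [pySetD_nrm C _ _ h1 h2, pyGetD_nrm C _ _ h1 h2, hC]
    have hC' : (C.set (pvNrm L (sel p)) (C.getD (pvNrm L (sel p)) 0 + 1)).length = L := by
      simpa using hC
    have hnrm : pvNrm L (sel p) < L := pvNrm_lt L (sel p) hp.1 hp.2
    rcases ih _ hC' (fun q hq => hb q (by simp [hq])) with ⟨ihlen, ihval⟩
    constructor
    · simpa [List.foldl_cons, hset] using ihlen
    · intro e
      rw [List.foldl_cons, hset]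
      rw [ihval e]
      rw [List.countP_cons]
      by_cases he : pvNrm L (sel p) = e
      · subst he
        rw [pvGetD_set_self _ _ (by omega) _ _]
        simp
        omega
      · rw [pvGetD_set_ne _ _ _ _ _ he]
        simp [he]

lemma pvPfold_char (L : Nat) (Q : List (Int × Int)) :
    ∀ (d a : Nat), a + d = L → 1 ≤ a → ∀ C : List Int, C.length = L →
      (∀ e, e < a → C.getD e 0 = (pvPrefx L Q e : Int)) →
      (∀ e, a ≤ e → e < L → C.getD e 0 = (pvCntx L Q e : Int)) →
      ((PySem.List.pyRange (a : Int) (L : Int) 1).foldl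
        (fun C i => PySem.List.pySetD C i (PySem.List.pyGetD C i 0 + PySem.List.pyGetD C (i - 1) 0)) C).length = L ∧
      ∀ e, e < L → ((PySem.List.pyRange (a : Int) (L : Int) 1).foldl
        (fun C i => PySem.List.pySetD C i (PySem.List.pyGetD C i 0 + PySem.List.pyGetD C (i - 1) 0)) C).getD e 0
          = (pvPrefx L Q e : Int) := by
  intro d
  induction d with
  | zero =>
    intro a ha _ C hC h1 _
    rw [PySem.List.pyRange_one_eq_nil (by omega : (L : Int) ≤ (a : Int))]
    exact ⟨hC, fun e he => h1 e (by omega)⟩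
  | succ d ihd =>
    intro a ha ha1 C hC h1 h2
    rw [PySem.List.pyRange_one_cons (by omega : (a : Int) < (L : Int)), List.foldl_cons]
    have hga : PySem.List.pyGetD C (a : Int) 0 = C.getD a 0 := by simp
    have hcast : (a : Int) - 1 = ((a - 1 : Nat) : Int) := by omega
    have hga1 : PySem.List.pyGetD C ((a : Int) - 1) 0 = C.getD (a - 1) 0 := by
      rw [hcast]; simp
    have hsets : PySem.List.pySetD C (a : Int) (PySem.List.pyGetD C (a : Int) 0 + PySem.List.pyGetD C ((a : Int) - 1) 0)
        = C.set a (C.getD a 0 + C.getD (a - 1) 0) := by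
      rw [hga, hga1]; simp
    have hv : C.getD a 0 + C.getD (a - 1) 0 = (pvPrefx L Q a : Int) := by
      rw [h2 a (le_refl a) (by omega), h1 (a - 1) (by omega)]
      have e1 : pvPrefx L Q a = pvLtx L Q (a + 1) := pvPrefx_eq L Q a
      have e2 : pvLtx L Q (a + 1) = pvLtx L Q a + pvCntx L Q a := pvLtx_succ L Q a
      have e3 : pvPrefx L Q (a - 1) = pvLtx L Q a := by
        have := pvPrefx_eq L Q (a - 1)
        rw [this]
        congr 1
        omega
      omega
    rw [hsets, hv]
    have hstep : ((a : Int) + 1) = (((a + 1 : Nat)) : Int) := by push_cast; ring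
    rw [hstep]
    refine ihd (a + 1) (by omega) (by omega) _ (by simpa using hC) ?_ ?_
    · intro e he
      by_cases hea : e = a
      · subst hea
        rw [pvGetD_set_self _ _ (by omega) _ _]
      · rw [pvGetD_set_ne _ _ _ _ _ (by omega)]
        exact h1 e (by omega)
    · intro e hae heL
      rw [pvGetD_set_ne _ _ _ _ _ (by omega)]
      exact h2 e (by omega) heL

lemma pvYsuf_char (n : Nat) (Q : List (Int × Int)) :
    ∀ (i : Nat), i ≤ n → ∀ Y : List Int, Y.length = n + 1 →
      (∀ e, i ≤ e → e ≤ n → Y.getD e 0 = (pvGey (n + 1) Q e : Int)) →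
      (∀ e, e < i → Y.getD e 0 = (pvCnty (n + 1) Q e : Int)) →
      ((PySem.List.pyRange ((i : Int) - 1) (-1) (-1)).foldl
        (fun Y i => PySem.List.pySetD Y i (PySem.List.pyGetD Y (i + 1) 0 + PySem.List.pyGetD Y i 0)) Y).length = n + 1 ∧
      ∀ e, e ≤ n → ((PySem.List.pyRange ((i : Int) - 1) (-1) (-1)).foldl
        (fun Y i => PySem.List.pySetD Y i (PySem.List.pyGetD Y (i + 1) 0 + PySem.List.pyGetD Y i 0)) Y).getD e 0
          = (pvGey (n + 1) Q e : Int) := by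
  intro i
  induction i with
  | zero =>
    intro _ Y hY h1 _
    rw [show ((0 : Nat) : Int) - 1 = (-1 : Int) by simp]
    rw [PySem.List.pyRange_neg_one_eq_nil (le_refl (-1 : Int))]
    exact ⟨hY, fun e he => h1 e (by omega) he⟩
  | succ i ihi =>
    intro hin Y hY h1 h2
    have hc1 : ((i + 1 : Nat) : Int) - 1 = (i : Int) := by push_cast; ring
    rw [hc1, PySem.List.pyRange_neg_one_cons (by omega : (-1 : Int) < (i : Int)), List.foldl_cons]
    have hga1 : PySem.List.pyGetD Y ((i : Int) + 1) 0 = Y.getD (i + 1) 0 := by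
      rw [(by push_cast; ring : ((i : Int) + 1) = ((i + 1 : Nat) : Int)), PySem.List.pyGetD_natCast]
    have hga : PySem.List.pyGetD Y (i : Int) 0 = Y.getD i 0 := by simp
    have hsets : PySem.List.pySetD Y (i : Int) (PySem.List.pyGetD Y ((i : Int) + 1) 0 + PySem.List.pyGetD Y (i : Int) 0)
        = Y.set i (Y.getD (i + 1) 0 + Y.getD i 0) := by
      rw [hga1, hga]; simp
    have hv : Y.getD (i + 1) 0 + Y.getD i 0 = (pvGey (n + 1) Q i : Int) := by
      rw [h1 (i + 1) (by omega) (by omega), h2 i (by omega)]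
      have := pvGey_succ (n + 1) Q i
      omega
    rw [hsets, hv]
    refine ihi (by omega) _ (by simpa using hY) ?_ ?_
    · intro e hie hen
      by_cases hei : e = i
      · subst hei
        rw [pvGetD_set_self _ _ (by omega) _ _]
      · rw [pvGetD_set_ne _ _ _ _ _ (by omega)]
        exact h1 e (by omega) hen
    · intro e hei
      rw [pvGetD_set_ne _ _ _ _ _ (by omega)]
      exact h2 e (by omega)
lemma pvSufx_step (L : Nat) (Q : List (Int × Int)) {i : Nat} (hi : i < Q.length) (e : Nat) :
    pvSufx L Q i e = (if pvKx L (Q.getD i (0, 0)) = e then 1 else 0) + pvSufx L Q (i + 1) e := by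
  unfold pvSufx
  rw [List.drop_eq_getElem_cons hi, List.countP_cons, List.getD_eq_getElem _ _ hi]
  by_cases h : pvKx L Q[i] = e <;> simp [h] <;> omega

lemma pvPhase3_char (L : Nat) (Q : List (Int × Int))
    (hPre : ∀ p ∈ Q, -(L : Int) ≤ p.1 ∧ p.1 < L) :
    ∀ (i : Nat), i ≤ Q.length → ∀ (B : List (Int × Int)) (C : List Int),
      B.length = Q.length → C.length = L →
      (∀ e, e < L → C.getD e 0 = (pvPrefx L Q e : Int) - (pvSufx L Q i e : Int)) →
      (∀ j, i ≤ j → j < Q.length → B.getD (pvSlot L Q j) (0, 0) = Q.getD j (0, 0)) →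
      ((PySem.List.pyRange ((i : Int) - 1) (-1) (-1)).foldl
          (fun (BC : List (Int × Int) × List Int) i =>
            (PySem.List.pySetD BC.1 (PySem.List.pyGetD BC.2 (PySem.List.pyGetD Q i (0, 0)).1 0 - 1)
              (PySem.List.pyGetD Q i (0, 0)),
             PySem.List.pySetD BC.2 (PySem.List.pyGetD Q i (0, 0)).1
              (PySem.List.pyGetD BC.2 (PySem.List.pyGetD Q i (0, 0)).1 0 - 1))) (B, C)).1.length = Q.length ∧
      ∀ j, j < Q.length →
        ((PySem.List.pyRange ((i : Int) - 1) (-1) (-1)).foldl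
          (fun (BC : List (Int × Int) × List Int) i =>
            (PySem.List.pySetD BC.1 (PySem.List.pyGetD BC.2 (PySem.List.pyGetD Q i (0, 0)).1 0 - 1)
              (PySem.List.pyGetD Q i (0, 0)),
             PySem.List.pySetD BC.2 (PySem.List.pyGetD Q i (0, 0)).1
              (PySem.List.pyGetD BC.2 (PySem.List.pyGetD Q i (0, 0)).1 0 - 1))) (B, C)).1.getD (pvSlot L Q j) (0, 0)
          = Q.getD j (0, 0) := by
  intro i
  induction i with
  | zero =>
    intro _ B C hB _ _ hBe
    rw [show ((0 : Nat) : Int) - 1 = (-1 : Int) by simp,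
      PySem.List.pyRange_neg_one_eq_nil (le_refl (-1 : Int))]
    exact ⟨hB, fun j hj => hBe j (by omega) hj⟩
  | succ i ih =>
    intro hin B C hB hC hCe hBe
    have hiQ : i < Q.length := by omega
    have hgQ : PySem.List.pyGetD Q (i : Int) (0, 0) = Q[i] := by
      rw [PySem.List.pyGetD_natCast, List.getD_eq_getElem _ _ hiQ]
    have hp := hPre Q[i] (List.getElem_mem hiQ)
    have hkk : pvNrm L (Q[i].1) = pvKx L (Q.getD i (0, 0)) := by
      unfold pvKx
      rw [List.getD_eq_getElem _ _ hiQ]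
    have hkL : pvKx L (Q.getD i (0, 0)) < L := by
      rw [← hkk]; exact pvNrm_lt L _ hp.1 hp.2
    have hCacc : PySem.List.pyGetD C (Q[i]).1 0 = C.getD (pvKx L (Q.getD i (0, 0))) 0 := by
      rw [pyGetD_nrm C _ _ (by rw [hC]; exact hp.1) (by rw [hC]; exact hp.2), hC, hkk]
    have hCk := hCe _ hkL
    have hsplitc : pvCntx L Q (pvKx L (Q.getD i (0, 0))) = pvRank L Q i + pvSufx L Q (i + 1) (pvKx L (Q.getD i (0, 0))) := by
      unfold pvCntx pvRank pvSufx
      exact pvCountP_take_drop Q (i + 1) _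
    have hrank1 := pvRank_pos L Q i hiQ
    have hrankle := pvRank_le L Q i
    have hprefx : pvPrefx L Q (pvKx L (Q.getD i (0, 0))) =
        pvLtx L Q (pvKx L (Q.getD i (0, 0))) + pvCntx L Q (pvKx L (Q.getD i (0, 0))) := by
      rw [pvPrefx_eq, pvLtx_succ]
    have hslotv : C.getD (pvKx L (Q.getD i (0, 0))) 0 - 1 = ((pvSlot L Q i : Nat) : Int) := by
      rw [hCk]
      unfold pvSlot
      omega
    rw [show ((i + 1 : Nat) : Int) - 1 = (i : Int) by push_cast; ring,
      PySem.List.pyRange_neg_one_cons (by omega : (-1 : Int) < (i : Int)), List.foldl_cons]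
    have hBset : PySem.List.pySetD B (PySem.List.pyGetD C (PySem.List.pyGetD Q (↑i) (0, 0)).1 0 - 1)
        (PySem.List.pyGetD Q (↑i) (0, 0)) = B.set (pvSlot L Q i) Q[i] := by
      rw [hgQ, hCacc, hslotv]
      simp
    have hCset : PySem.List.pySetD C (PySem.List.pyGetD Q (↑i) (0, 0)).1
        (PySem.List.pyGetD C (PySem.List.pyGetD Q (↑i) (0, 0)).1 0 - 1)
        = C.set (pvKx L (Q.getD i (0, 0))) (C.getD (pvKx L (Q.getD i (0, 0))) 0 - 1) := by
      rw [hgQ, hCacc, pySetD_nrm C _ _ (by rw [hC]; exact hp.1) (by rw [hC]; exact hp.2), hC, hkk]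
    simp only [hBset, hCset]
    refine ih (by omega) _ _ (by simpa using hB) (by simpa using hC) ?_ ?_
    · intro e heL
      have hstep := pvSufx_step L Q hiQ e
      by_cases he : e = pvKx L (Q.getD i (0, 0))
      · subst he
        rw [pvGetD_set_self _ _ (by omega) _ _, hCk, hstep]
        simp
        omega
      · rw [pvGetD_set_ne _ _ _ _ _ (by omega : pvKx L (Q.getD i (0,0)) ≠ e)]
        rw [hCe e heL]
        have : pvSufx L Q i e = pvSufx L Q (i + 1) e := by
          rw [hstep, if_neg (by omega : ¬ (pvKx L (Q.getD i (0, 0)) = e))]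
          omega
        rw [this]
    · intro j hij hjQ
      by_cases hji : j = i
      · subst hji
        rw [pvGetD_set_self _ _ (by rw [hB]; exact pvSlot_lt L Q hiQ) _ _,
          List.getD_eq_getElem _ _ hiQ]
      · rw [pvGetD_set_ne _ _ _ _ _ (pvSlot_ne L Q (by omega) hjQ)]
        exact hBe j (by omega) hjQ
lemma pvSol_char (L : Nat) (Q S : List (Int × Int)) (Y : List Int) (hYL : Y.length = L)
    (hmem : ∀ p ∈ S, -(L : Int) ≤ p.1 ∧ p.1 < L ∧ -(L : Int) ≤ p.2 ∧ p.2 < L)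
    (hY : ∀ e, e < L → Y.getD e 0 = (pvGey L Q e : Int)) :
    ∀ (i : Nat), i ≤ S.length → ∀ (sol : Int) (X : List Int), X.length = L →
      (∀ e, e < L → X.getD e 0 = (pvCntx L Q e : Int) - (pvSufx L S i e : Int)) →
      ((PySem.List.pyRange ((i : Int) - 1) (-1) (-1)).foldl
        (fun (SX : Int × List Int) i =>
          (max SX.1 (i - PySem.List.pyGetD Y (PySem.List.pyGetD S i (0, 0)).2 0 + 1
              - PySem.List.pyGetD SX.2 (PySem.List.pyGetD S i (0, 0)).1 0 + 1),
           PySem.List.pySetD SX.2 (PySem.List.pyGetD S i (0, 0)).1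
             (PySem.List.pyGetD SX.2 (PySem.List.pyGetD S i (0, 0)).1 0 - 1))) (sol, X)).1
        = ((List.range i).reverse).foldl (fun s j => max s (pvG L Q S j)) sol := by
  intro i
  induction i with
  | zero =>
    intro _ sol X _ _
    rw [show ((0 : Nat) : Int) - 1 = (-1 : Int) by simp,
      PySem.List.pyRange_neg_one_eq_nil (le_refl (-1 : Int))]
    simp
  | succ i ih =>
    intro hin sol X hX hXe
    have hiS : i < S.length := by omega
    have hgS : PySem.List.pyGetD S (i : Int) (0, 0) = S[i] := by
      rw [PySem.List.pyGetD_natCast, List.getD_eq_getElem _ _ hiS]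
    have hp := hmem S[i] (List.getElem_mem hiS)
    have hkk : pvNrm L (S[i].1) = pvKx L (S.getD i (0, 0)) := by
      unfold pvKx
      rw [List.getD_eq_getElem _ _ hiS]
    have hky : pvNrm L (S[i].2) = pvKy L (S.getD i (0, 0)) := by
      unfold pvKy
      rw [List.getD_eq_getElem _ _ hiS]
    have hkL : pvKx L (S.getD i (0, 0)) < L := by
      rw [← hkk]; exact pvNrm_lt L _ hp.1 hp.2.1
    have hkyL : pvKy L (S.getD i (0, 0)) < L := by
      rw [← hky]; exact pvNrm_lt L _ hp.2.2.1 hp.2.2.2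
    have hYacc : PySem.List.pyGetD Y (S[i]).2 0 = (pvGey L Q (pvKy L (S.getD i (0, 0))) : Int) := by
      rw [pyGetD_nrm Y _ _ (by rw [hYL]; exact hp.2.2.1) (by rw [hYL]; exact hp.2.2.2), hYL, hky]
      exact hY _ hkyL
    have hXacc : PySem.List.pyGetD X (S[i]).1 0 = X.getD (pvKx L (S.getD i (0, 0))) 0 := by
      rw [pyGetD_nrm X _ _ (by rw [hX]; exact hp.1) (by rw [hX]; exact hp.2.1), hX, hkk]
    have hXk := hXe _ hkL
    rw [show ((i + 1 : Nat) : Int) - 1 = (i : Int) by push_cast; ring,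
      PySem.List.pyRange_neg_one_cons (by omega : (-1 : Int) < (i : Int)), List.foldl_cons]
    have hXset : PySem.List.pySetD X (PySem.List.pyGetD S (↑i) (0, 0)).1
        (PySem.List.pyGetD X (PySem.List.pyGetD S (↑i) (0, 0)).1 0 - 1)
        = X.set (pvKx L (S.getD i (0, 0))) (X.getD (pvKx L (S.getD i (0, 0))) 0 - 1) := by
      rw [hgS, hXacc, pySetD_nrm X _ _ (by rw [hX]; exact hp.1) (by rw [hX]; exact hp.2.1), hX, hkk]
    simp only [hXset]
    rw [show (max sol ((i : Int) - PySem.List.pyGetD Y (PySem.List.pyGetD S (↑i) (0, 0)).2 0 + 1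
        - PySem.List.pyGetD X (PySem.List.pyGetD S (↑i) (0, 0)).1 0 + 1)) = max sol (pvG L Q S i) from by
      rw [hgS, hYacc, hXacc, hXk]
      unfold pvG
      congr 1]
    rw [ih (by omega) _ _ (by simpa using hX) ?_]
    · rw [List.range_succ, List.reverse_append]
      simp
    · intro e heL
      have hstep := pvSufx_step L S hiS e
      by_cases he : e = pvKx L (S.getD i (0, 0))
      · subst he
        rw [pvGetD_set_self _ _ (by omega) _ _, hXk, hstep]
        simp
        omega
      · rw [pvGetD_set_ne _ _ _ _ _ (by omega : pvKx L (S.getD i (0, 0)) ≠ e), hXe e heL,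
          hstep, if_neg (by omega : ¬ (pvKx L (S.getD i (0, 0)) = e))]
        push_cast
        ring

lemma pvXlt_char (L : Nat) (Q : List (Int × Int)) (C0 : List Int)
    (hCnt : ∀ e, e < L → C0.getD e 0 = (pvCntx L Q e : Int)) :
    ∀ (d a : Nat), a + d = L → ∀ (Xlt : List Int) (less : Int), Xlt.length = L →
      less = (pvLtx L Q a : Int) →
      (∀ e, e < a → Xlt.getD e 0 = (pvLtx L Q e : Int)) →
      ((PySem.List.pyRange (a : Int) (L : Int) 1).foldl
        (fun (XL : List Int × Int) v =>
          (PySem.List.pySetD XL.1 v XL.2, XL.2 + PySem.List.pyGetD C0 v 0)) (Xlt, less)).1.length = L ∧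
      ∀ e, e < L → ((PySem.List.pyRange (a : Int) (L : Int) 1).foldl
        (fun (XL : List Int × Int) v =>
          (PySem.List.pySetD XL.1 v XL.2, XL.2 + PySem.List.pyGetD C0 v 0)) (Xlt, less)).1.getD e 0
        = (pvLtx L Q e : Int) := by
  intro d
  induction d with
  | zero =>
    intro a ha Xlt less hXl _ h2
    rw [PySem.List.pyRange_one_eq_nil (by omega : (L : Int) ≤ (a : Int))]
    exact ⟨hXl, fun e he => h2 e (by omega)⟩
  | succ d ihd =>
    intro a ha Xlt less hXl hless h2
    rw [PySem.List.pyRange_one_cons (by omega : (a : Int) < (L : Int)), List.foldl_cons]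
    have hset : PySem.List.pySetD Xlt (a : Int) less = Xlt.set a less := by simp
    have hga : PySem.List.pyGetD C0 (a : Int) 0 = C0.getD a 0 := by simp
    rw [hset, hga]
    have hstep : ((a : Int) + 1) = (((a + 1 : Nat)) : Int) := by push_cast; ring
    rw [hstep]
    refine ihd (a + 1) (by omega) _ _ (by simpa using hXl) ?_ ?_
    · rw [hless, hCnt a (by omega)]
      rw [pvLtx_succ]
      push_cast
      ring
    · intro e he
      by_cases hea : e = a
      · subst hea
        rw [pvGetD_set_self _ _ (by omega) _ _, hless]
      · rw [pvGetD_set_ne _ _ _ _ _ (by omega)]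
        exact h2 e (by omega)

lemma pvIfMax (b v : Int) : (if v > b then v else b) = max b v := by
  rcases le_total v b with h | h
  · rw [if_neg (by omega), max_eq_left h]
  · rcases eq_or_lt_of_le h with h' | h'
    · subst h'
      simp
    · rw [if_pos h', max_eq_right h]

-- ===== VERDICT (by name: the statement is the Claim_ definition above) =====
lemma pvGetD_replicate (k e : Nat) : (List.replicate k (0 : Int)).getD e 0 = 0 := by
  rcases Nat.lt_or_ge e k with h | h
  · rw [List.getD_eq_getElem _ _ (by simpa using h)]
    simp
  · rw [List.getD_eq_default _ _ (by simpa using h)]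

theorem dominance_spec : Claim_equal_dominance := by
  unfold Claim_equal_dominance
  intro P _ hPre
  unfold Spec_dominance
  have hPreB : ∀ p ∈ P, -((P.length + 1 : Nat) : Int) ≤ p.1 ∧ p.1 < ((P.length + 1 : Nat) : Int)
      ∧ -((P.length + 1 : Nat) : Int) ≤ p.2 ∧ p.2 < ((P.length + 1 : Nat) : Int) := by
    intro p hp
    have h := hPre p hp
    push_cast
    omega
  simp only [dominance, countingSort, dominance_alt, if_true]
  rw [show ((P.length : Int) + 1).toNat = P.length + 1 from by omega]
  rw [show ((P.length : Int)).toNat = P.length from by omega]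
  -- convert index loops over P into folds over P
  have hcv1 := PySem.List.foldl_pyRange_zero_pyGetD' P ((0 : Int), (0 : Int))
    (fun (C : List Int) p => PySem.List.pySetD C p.1 (PySem.List.pyGetD C p.1 0 + 1))
    (List.replicate (P.length + 1) 0)
  beta_reduce at hcv1
  rw [hcv1]
  have hcv2 := PySem.List.foldl_pyRange_zero_pyGetD' P ((0 : Int), (0 : Int))
    (fun (XY : List Int × List Int) p =>
      (PySem.List.pySetD XY.1 p.1 (PySem.List.pyGetD XY.1 p.1 0 + 1),
       PySem.List.pySetD XY.2 p.2 (PySem.List.pyGetD XY.2 p.2 0 + 1)))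
    (List.replicate (P.length + 1) 0, List.replicate (P.length + 1) 0)
  beta_reduce at hcv2
  rw [hcv2]
  simp only [pvFoldl_pair_split P
    (fun (X : List Int) p => PySem.List.pySetD X p.1 (PySem.List.pyGetD X p.1 0 + 1))
    (fun (Y : List Int) p => PySem.List.pySetD Y p.2 (PySem.List.pyGetD Y p.2 0 + 1))
    (List.replicate (P.length + 1) 0) (List.replicate (P.length + 1) 0)]
  rw [show (fun (Y : List Int) (v : Int) => PySem.List.pySetD Y v (PySem.List.pyGetD Y v 0 + PySem.List.pyGetD Y (v + 1) 0))
      = (fun (Y : List Int) (i : Int) => PySem.List.pySetD Y i (PySem.List.pyGetD Y (i + 1) 0 + PySem.List.pyGetD Y i 0)) from by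
    funext Y v
    rw [Int.add_comm]]
  set n := P.length with hn
  have hb1 : ∀ p ∈ P, -((n + 1 : Nat) : Int) ≤ p.1 ∧ p.1 < ((n + 1 : Nat) : Int) :=
    fun p hp => ⟨(hPreB p hp).1, (hPreB p hp).2.1⟩
  have hb2 : ∀ p ∈ P, -((n + 1 : Nat) : Int) ≤ p.2 ∧ p.2 < ((n + 1 : Nat) : Int) :=
    fun p hp => ⟨(hPreB p hp).2.2.1, (hPreB p hp).2.2.2⟩
  -- name the intermediate arrays
  set C0 := List.foldl (fun (X : List Int) p => PySem.List.pySetD X p.1 (PySem.List.pyGetD X p.1 0 + 1)) (List.replicate (n + 1) 0) P with hC0def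
  set YA := List.foldl (fun (Y : List Int) p => PySem.List.pySetD Y p.2 (PySem.List.pyGetD Y p.2 0 + 1)) (List.replicate (n + 1) 0) P with hYAdef
  set C1 := List.foldl (fun (C : List Int) i => PySem.List.pySetD C i (PySem.List.pyGetD C i 0 + PySem.List.pyGetD C (i - 1) 0)) C0 (PySem.List.pyRange 1 ((n : Int) + 1) 1) with hC1def
  set SBC := List.foldl (fun (BC : List (Int × Int) × List Int) i =>
      (PySem.List.pySetD BC.1 (PySem.List.pyGetD BC.2 (PySem.List.pyGetD P i (0, 0)).1 0 - 1) (PySem.List.pyGetD P i (0, 0)),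
       PySem.List.pySetD BC.2 (PySem.List.pyGetD P i (0, 0)).1 (PySem.List.pyGetD BC.2 (PySem.List.pyGetD P i (0, 0)).1 0 - 1)))
      (List.replicate n (0, 0), C1) (PySem.List.pyRange ((n : Int) - 1) (-1) (-1)) with hSBCdef
  set YF := List.foldl (fun (Y : List Int) i => PySem.List.pySetD Y i (PySem.List.pyGetD Y (i + 1) 0 + PySem.List.pyGetD Y i 0)) YA (PySem.List.pyRange ((n : Int) - 1) (-1) (-1)) with hYFdef
  set XL := List.foldl (fun (XL : List Int × Int) v => (PySem.List.pySetD XL.1 v XL.2, XL.2 + PySem.List.pyGetD C0 v 0)) (List.replicate (n + 1) 0, 0) (PySem.List.pyRange 0 ((n : Int) + 1) 1) with hXLdef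
  -- characterize C0 and YA
  have hC0ch := pvCfold_char (n + 1) (fun p => p.1) P (List.replicate (n + 1) 0) (by simp) hb1
  beta_reduce at hC0ch
  rw [← hC0def] at hC0ch
  obtain ⟨hC0len, hC0val⟩ := hC0ch
  have hC0c : ∀ e : Nat, C0.getD e 0 = (pvCntx (n + 1) P e : Int) := by
    intro e
    rw [hC0val e, pvGetD_replicate]
    unfold pvCntx pvKx
    omega
  have hYAch := pvCfold_char (n + 1) (fun p => p.2) P (List.replicate (n + 1) 0) (by simp) hb2
  beta_reduce at hYAch
  rw [← hYAdef] at hYAch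
  obtain ⟨hYAlen, hYAval⟩ := hYAch
  have hYAc : ∀ e : Nat, YA.getD e 0 = (pvCnty (n + 1) P e : Int) := by
    intro e
    rw [hYAval e, pvGetD_replicate]
    unfold pvCnty pvKy
    omega
  -- characterize C1 (prefix sums)
  have hprefx0 : pvPrefx (n + 1) P 0 = pvCntx (n + 1) P 0 := by
    rw [pvPrefx_eq, pvLtx_succ, pvLtx_zero]
    omega
  have hC1ch := pvPfold_char (n + 1) P n 1 (by omega) (by omega) C0 hC0len
    (by intro e he
        have he0 : e = 0 := by omega
        subst he0
        rw [hC0c, hprefx0])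
    (by intro e h1 h2; rw [hC0c])
  push_cast at hC1ch
  rw [← hC1def] at hC1ch
  obtain ⟨hC1len, hC1val⟩ := hC1ch
  -- characterize S (counting sort output)
  have hSch := pvPhase3_char (n + 1) P hb1 n (le_of_eq hn) (List.replicate n (0, 0)) C1 (by simp [hn]) hC1len
    (by intro e he
        rw [hC1val e he]
        have hz : pvSufx (n + 1) P n e = 0 := by
          unfold pvSufx
          rw [hn, List.drop_length]
          simp
        rw [hz]
        omega)
    (by intro j h1 h2; omega)
  rw [← hSBCdef] at hSch
  obtain ⟨hSlen, hSget⟩ := hSch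
  -- characterize YF (suffix sums of y-counts)
  have hky : ∀ p ∈ P, pvKy (n + 1) p ≤ n := by
    intro p hp
    have := pvNrm_lt (n + 1) p.2 (hb2 p hp).1 (hb2 p hp).2
    unfold pvKy
    omega
  have hYFch := pvYsuf_char n P n (le_refl n) YA hYAlen
    (by intro e h1 h2
        have he : e = n := by omega
        subst he
        rw [hYAc, pvGey_top (n + 1) n P hky])
    (by intro e he; rw [hYAc])
  rw [← hYFdef] at hYFch
  obtain ⟨hYFlen, hYFval⟩ := hYFch
  -- S is a sorted permutation of P
  have hSP : SBC.1.Perm P := pvS_perm (n + 1) P SBC.1 hSlen hSget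
  have hmemS : ∀ p ∈ SBC.1, -((n + 1 : Nat) : Int) ≤ p.1 ∧ p.1 < ((n + 1 : Nat) : Int)
      ∧ -((n + 1 : Nat) : Int) ≤ p.2 ∧ p.2 < ((n + 1 : Nat) : Int) :=
    fun p hp => hPreB p (hSP.mem_iff.1 hp)
  -- run the solution loop
  have hsol := pvSol_char (n + 1) P SBC.1 YF hYFlen hmemS
    (fun e he => hYFval e (by omega)) n (by rw [hSlen]) (-1) C0 hC0len
    (by intro e he
        have hz : pvSufx (n + 1) SBC.1 n e = 0 := by
          unfold pvSufx
          rw [show n = SBC.1.length from by rw [hSlen], List.drop_length]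
          simp
        rw [hz, hC0c]
        omega)
  rw [hsol]
  -- turn the loop values into pvVal and fold over a permutation of P
  have hG2V : (List.range n).reverse.foldl (fun s j => max s (pvG (n + 1) P SBC.1 j)) (-1)
      = (List.range n).reverse.foldl (fun s j => max s (pvVal (n + 1) P (SBC.1.getD j (0, 0)))) (-1) := by
    refine PySem.List.foldl_congr_mem _ _ _ _ ?_
    intro s j hj
    have hjn : j < P.length := by
      rw [← hn]
      simpa using List.mem_reverse.1 hj
    rw [pvG_eq_val (n + 1) P SBC.1 hSlen hSget hjn]
  have hmap1 : (List.range n).reverse.foldl (fun s j => max s (pvVal (n + 1) P (SBC.1.getD j (0, 0)))) (-1)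
      = ((List.range n).reverse.map (fun j => pvVal (n + 1) P (SBC.1.getD j (0, 0)))).foldl max (-1) :=
    List.foldl_map.symm
  have hlisteq : (List.range n).map (fun j => pvVal (n + 1) P (SBC.1.getD j (0, 0))) = SBC.1.map (pvVal (n + 1) P) := by
    conv_rhs => rw [pvList_eq_map_getD_range SBC.1 (0, 0)]
    rw [List.map_map, show SBC.1.length = n from by rw [hSlen]]
    simp [Function.comp]
  have hpermmap : ((List.range n).reverse.map (fun j => pvVal (n + 1) P (SBC.1.getD j (0, 0)))).Perm (P.map (pvVal (n + 1) P)) := by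
    refine ((List.reverse_perm _).map _).trans ?_
    rw [hlisteq]
    exact hSP.map _
  rw [hG2V, hmap1, hpermmap.foldl_op_eq]
  -- characterize Xlt and finish the B side
  have hXLch := pvXlt_char (n + 1) P C0 (fun e _ => hC0c e) (n + 1) 0 (by omega)
    (List.replicate (n + 1) 0) 0 (by simp) (by rw [pvLtx_zero]; simp) (by intro e he; omega)
  push_cast at hXLch
  rw [← hXLdef] at hXLch
  obtain ⟨hXltlen, hXltval⟩ := hXLch
  have hBconv : List.foldl (fun best p =>
      if PySem.List.pyGetD XL.1 p.1 0 + 1 - PySem.List.pyGetD YF p.2 0 > best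
      then PySem.List.pyGetD XL.1 p.1 0 + 1 - PySem.List.pyGetD YF p.2 0 else best) (-1) P
      = List.foldl (fun best p => max best (pvVal (n + 1) P p)) (-1) P := by
    refine PySem.List.foldl_congr_mem _ _ _ _ ?_
    intro best p hp
    have hkxp : pvNrm (n + 1) p.1 = pvKx (n + 1) p := rfl
    have hkyp : pvNrm (n + 1) p.2 = pvKy (n + 1) p := rfl
    have hkxl : pvKx (n + 1) p < n + 1 := pvNrm_lt (n + 1) p.1 (hb1 p hp).1 (hb1 p hp).2
    have hkyl : pvKy (n + 1) p < n + 1 := pvNrm_lt (n + 1) p.2 (hb2 p hp).1 (hb2 p hp).2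
    have hx : PySem.List.pyGetD XL.1 p.1 0 = (pvLtx (n + 1) P (pvKx (n + 1) p) : Int) := by
      rw [pyGetD_nrm XL.1 _ _ (by rw [hXltlen]; exact (hb1 p hp).1) (by rw [hXltlen]; exact (hb1 p hp).2), hXltlen, hkxp]
      exact hXltval _ hkxl
    have hy : PySem.List.pyGetD YF p.2 0 = (pvGey (n + 1) P (pvKy (n + 1) p) : Int) := by
      rw [pyGetD_nrm YF _ _ (by rw [hYFlen]; exact (hb2 p hp).1) (by rw [hYFlen]; exact (hb2 p hp).2), hYFlen, hkyp]
      exact hYFval _ (by omega)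
    rw [hx, hy, pvIfMax]
    unfold pvVal
    rfl
  rw [hBconv, show List.foldl (fun best p => max best (pvVal (n + 1) P p)) (-1) P
      = (P.map (pvVal (n + 1) P)).foldl max (-1) from List.foldl_map.symm]
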